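-- pv_equiv track=rewrite | github.com/pypi-data/pypi-mirror-293 | packages/mxlm/mxlm-0.1.0.tar.gz/mxlm-0.1.0/mxlm/mxlm_utils.py | bbcode_to_markdown_math
-- ===== SOURCE A (Python) =====
-- def bbcode_to_markdown_math(messages):  # inplace
--     for msg in messages:
--         if msg["role"] == "assistant":
--             msg["content"] = (
--                 msg["content"]
--                 .replace("\\[ ", "$$")
--                 .replace(" \\]", "$$")
--                 .replace("\\( ", "$")
--                 .replace(" \\)", "$")
--                 .replace("\\[", "$$")
--                 .replace("\\]", "$$")
--                 .replace("\\(", "$")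
--                 .replace("\\)", "$")
--             )
--     return messages
-- ===== SOURCE B (Python) =====
-- def _convert(s):
--     out = []
--     i = 0
--     n = len(s)
--     while i < n:
--         c = s[i]
--         if c == "\\" and i + 1 < n and s[i + 1] in "[]()":
--             d = s[i + 1]
--             out.append("$$" if d in "[]" else "$")
--             i += 2
--             if d in "([" and i < n and s[i] == " ":
--                 i += 1
--         elif c == " " and s[i + 1:i + 3] in ("\\]", "\\)"):
--             out.append("$$" if s[i + 2] == "]" else "$")
--             i += 3
--         else:
--             out.append(c)
--             i += 1
--     return "".join(out)
--
--
-- def bbcode_to_markdown_math(messages):  # inplace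
--     for msg in messages:
--         if msg["role"] == "assistant":
--             msg["content"] = _convert(msg["content"])
--     return messages
-- ===== Notes on version B (the rewrite author's own statement) =====
-- stated objective: alternative
-- what changed: Replaced the eight sequential full-string replace passes by a single left-to-right scan of the content that, at each position, recognises \[ \] \( \) (with an optional adjacent space) once and emits $$ or $; the outer loop, in-place update and return are kept.
import Mathlib
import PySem

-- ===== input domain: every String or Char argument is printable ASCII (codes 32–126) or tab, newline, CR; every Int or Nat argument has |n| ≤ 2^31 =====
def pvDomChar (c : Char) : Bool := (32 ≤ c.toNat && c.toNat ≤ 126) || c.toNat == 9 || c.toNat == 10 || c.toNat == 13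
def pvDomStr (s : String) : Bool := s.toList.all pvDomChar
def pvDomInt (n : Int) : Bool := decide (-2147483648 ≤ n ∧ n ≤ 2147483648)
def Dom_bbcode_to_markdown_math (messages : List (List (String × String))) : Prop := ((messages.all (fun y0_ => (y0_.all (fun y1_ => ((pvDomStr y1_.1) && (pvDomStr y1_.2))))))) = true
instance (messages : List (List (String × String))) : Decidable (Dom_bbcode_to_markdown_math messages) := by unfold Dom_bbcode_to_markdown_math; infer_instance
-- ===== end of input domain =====

-- B replaces A's eight sequential .replace passes over the content by a single left-to-right
-- scan emitting $$/$ (same outer loop, same in-place dict update, same return value).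


-- ===== PORT A =====
-- the eight chained .replace calls of A, in A's order
def pvReplaceAllA (s : String) : String :=
  PySem.Str.replace (PySem.Str.replace (PySem.Str.replace (PySem.Str.replace
    (PySem.Str.replace (PySem.Str.replace (PySem.Str.replace (PySem.Str.replace
      s "\\[ " "$$") " \\]" "$$") "\\( " "$") " \\)" "$")
    "\\[" "$$") "\\]" "$$") "\\(" "$") "\\)" "$"

def bbcode_to_markdown_math (messages : List (List (String × String))) : List (List (String × String)) :=
  messages.map (fun msg =>
    let d := PySem.Dict.mk msg
    match d.get? "role" with
    | none => msg          -- msg["role"] raises KeyError: excluded by Pre_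
    | some r =>
      if r = "assistant" then
        match d.get? "content" with
        | none => msg      -- msg["content"] raises KeyError: excluded by Pre_
        | some c => (d.insert "content" (pvReplaceAllA c)).items
      else msg)

-- ===== PORT B =====
-- B's single left-to-right scan over the characters of the content.
-- After emitting $$/$ for \\[ or \\( Source B skips one adjacent space; pvSkipSpace is that step.
def pvSkipSpace : List Char → List Char
  | ' ' :: t => t
  | t => t

theorem pvSkipSpace_length (t : List Char) : (pvSkipSpace t).length ≤ t.length := by
  cases t with
  | nil => simp [pvSkipSpace]
  | cons c u =>
    by_cases h : c = ' '
    · subst h; simp [pvSkipSpace]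
    · have : pvSkipSpace (c::u) = c::u := by
        rw [pvSkipSpace.eq_def]; split <;> simp_all
      rw [this]

def pvConv : List Char → List Char
  | [] => []
  | '\\' :: '[' :: t => '$' :: '$' :: pvConv (pvSkipSpace t)
  | '\\' :: ']' :: t => '$' :: '$' :: pvConv t
  | '\\' :: '(' :: t => '$' :: pvConv (pvSkipSpace t)
  | '\\' :: ')' :: t => '$' :: pvConv t
  | ' ' :: '\\' :: ']' :: t => '$' :: '$' :: pvConv t
  | ' ' :: '\\' :: ')' :: t => '$' :: pvConv t
  | c :: t => c :: pvConv t
termination_by l => l.length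
decreasing_by all_goals simp <;> first
  | exact le_trans (pvSkipSpace_length _) (Nat.le_succ _)
  | omega

def bbcode_to_markdown_math_alt (messages : List (List (String × String))) : List (List (String × String)) :=
  messages.map (fun msg =>
    let d := PySem.Dict.mk msg
    match d.get? "role" with
    | none => msg
    | some r =>
      if r = "assistant" then
        match d.get? "content" with
        | none => msg
        | some c => (d.insert "content" (String.ofList (pvConv c.toList))).items
      else msg)

-- ===== PRECONDITION & SPEC =====
-- Pre_ excludes exactly the inputs on which A raises KeyError: a message without a "role" key,
-- or an assistant message without a "content" key.
def Pre_bbcode_to_markdown_math (messages : List (List (String × String))) : Prop :=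
  ∀ msg ∈ messages, (PySem.Dict.mk msg).get? "role" ≠ none ∧
    ((PySem.Dict.mk msg).get? "role" = some "assistant" → (PySem.Dict.mk msg).get? "content" ≠ none)
instance (messages : List (List (String × String))) : Decidable (Pre_bbcode_to_markdown_math messages) := by unfold Pre_bbcode_to_markdown_math; infer_instance

def pvWitness_bbcode_to_markdown_math : (List (List (String × String))) :=
  [[("role", "assistant"), ("content", "\\[ x^2 \\]")], [("role", "user"), ("content", "hi")]]

def Spec_bbcode_to_markdown_math (messages : List (List (String × String))) (out : List (List (String × String))) : Prop := out = bbcode_to_markdown_math_alt messages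
instance (messages : List (List (String × String))) (out : List (List (String × String))) : Decidable (Spec_bbcode_to_markdown_math messages out) := by unfold Spec_bbcode_to_markdown_math; infer_instance

-- ===== CLAIM (what is proved, stated in full; the proofs are below) =====
def Claim_equal_bbcode_to_markdown_math : Prop := ∀ (messages : List (List (String × String))), Dom_bbcode_to_markdown_math messages → Pre_bbcode_to_markdown_math messages → Spec_bbcode_to_markdown_math messages (bbcode_to_markdown_math messages)

-- ===== LEMMAS AND PROOFS =====

-- `Rp old new s` is Chars.replace with the pattern first (proof-side view of Python's s.replace(old,new))
def Rp (old new s : List Char) : List Char := PySem.Chars.replace s old new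

-- A's eight passes, innermost applied first, on lists of characters
def chainL (l : List Char) : List Char :=
  Rp ['\\',')'] ['$'] (Rp ['\\','('] ['$'] (Rp ['\\',']'] ['$','$'] (Rp ['\\','['] ['$','$']
    (Rp [' ','\\',')'] ['$'] (Rp ['\\','(',' '] ['$'] (Rp [' ','\\',']'] ['$','$']
      (Rp ['\\','[',' '] ['$','$'] l)))))))

theorem go_zero (old new l acc) : PySem.Chars.replace.go old new 0 l acc = acc.reverse ++ l := by
  rw [PySem.Chars.replace.go]

theorem go_succ_cons (old new : List Char) (fuel : Nat) (c t acc) :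
    PySem.Chars.replace.go old new (fuel+1) (c::t) acc =
      if old.isPrefixOf (c::t) = true then
        PySem.Chars.replace.go old new fuel (List.drop old.length (c::t)) (new.reverse ++ acc)
      else PySem.Chars.replace.go old new fuel t (c :: acc) := by
  rw [PySem.Chars.replace.go]

theorem go_succ_nil (old new : List Char) (fuel : Nat) (acc) :
    PySem.Chars.replace.go old new (fuel+1) [] acc = acc.reverse := by
  rw [PySem.Chars.replace.go]; simp

theorem go_acc (old new : List Char) (fuel : Nat) : ∀ l acc, PySem.Chars.replace.go old new fuel l acc = acc.reverse ++ PySem.Chars.replace.go old new fuel l [] := by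
  induction fuel with
  | zero => intro l acc; simp [go_zero]
  | succ n ih =>
    intro l acc
    cases l with
    | nil => simp [go_succ_nil]
    | cons c t =>
      rw [go_succ_cons, go_succ_cons]
      split
      · rw [ih (List.drop old.length (c::t)) (new.reverse ++ acc),
           ih (List.drop old.length (c::t)) (new.reverse ++ [])]; simp
      · rw [ih t (c::acc), ih t (c::[])]; simp

theorem go_fuel (old new : List Char) (hold : old ≠ []) : ∀ (fuel : Nat) (l : List Char), l.length ≤ fuel →
    PySem.Chars.replace.go old new fuel l [] = PySem.Chars.replace.go old new l.length l [] := by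
  intro fuel
  induction fuel using Nat.strong_induction_on with
  | _ fuel ih =>
    intro l hl
    match fuel, l with
    | 0, [] => rfl
    | n+1, [] => rw [go_succ_nil]; rw [show ([]:List Char).length = 0 from rfl, go_zero]; rfl
    | n+1, c::t =>
      rw [go_succ_cons]
      rw [show (c::t).length = t.length + 1 from rfl, go_succ_cons]
      have holdlen : 1 ≤ old.length := by cases old with | nil => simp at hold | cons a b => simp
      have hln : t.length ≤ n := by simpa using hl
      split
      case isTrue h =>
        have hdrop : (List.drop old.length (c::t)).length = (c::t).length - old.length := List.length_drop ..
        rw [go_acc old new n _ (new.reverse ++ []), go_acc old new t.length _ (new.reverse ++ [])]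
        rw [ih n (by omega) _ (by simp at hdrop ⊢; omega)]
        rw [ih t.length (by omega) _ (by simp at hdrop ⊢; omega)]
      case isFalse h =>
        rw [go_acc old new n t [c], go_acc old new t.length t [c]]
        rw [ih n (by omega) t hln, ih t.length (by omega) t (le_refl _)]

theorem Rp_nil (old new : List Char) (hold : old ≠ []) : Rp old new [] = [] := by
  unfold Rp PySem.Chars.replace
  rw [if_neg (by simpa using hold)]
  rfl

theorem Rp_skip (old new : List Char) (c : Char) (x : List Char)
    (h : old.isPrefixOf (c::x) = false) : Rp old new (c::x) = c :: Rp old new x := by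
  have hold : old ≠ [] := by rintro rfl; simp [List.isPrefixOf] at h
  unfold Rp PySem.Chars.replace
  rw [if_neg (by simpa using hold), if_neg (by simpa using hold)]
  rw [show (c::x).length = x.length + 1 from rfl, go_succ_cons, if_neg (by simp [h])]
  rw [go_acc, go_fuel old new hold x.length x (le_refl _)]
  rfl

theorem Rp_match (old new : List Char) (x : List Char) (hold : old ≠ []) :
    Rp old new (old ++ x) = new ++ Rp old new (x) := by
  have holdlen : 1 ≤ old.length := by cases old with | nil => simp at hold | cons a b => simp
  unfold Rp PySem.Chars.replace
  rw [if_neg (by simpa using hold), if_neg (by simpa using hold)]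
  cases hx : old ++ x with
  | nil => simp at hx; exact absurd hx.1 hold
  | cons c t =>
    rw [← hx]
    have hlen : (old ++ x).length = old.length + x.length := by simp
    have : (old++x).length = ((old++x).length - 1) + 1 := by omega
    rw [this, hx, go_succ_cons, ← hx,
       if_pos (List.isPrefixOf_iff_prefix.mpr (List.prefix_append old x))]
    rw [List.drop_left]
    rw [go_acc, go_fuel old new hold _ x (by omega)]
    simp

theorem head?_Rp (old new s : List Char) (hold : old ≠ []) (hnew : new ≠ []) :
    (Rp old new s).head? = s.head? ∨ (Rp old new s).head? = new.head? := by
  cases s with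
  | nil => rw [Rp_nil _ _ hold]; left; rfl
  | cons c t =>
    by_cases h : old.isPrefixOf (c::t) = true
    · right
      obtain ⟨x, hx⟩ := List.isPrefixOf_iff_prefix.mp h
      rw [← hx, Rp_match _ _ _ hold]
      cases new with
      | nil => simp at hnew
      | cons a b => simp
    · left
      rw [Rp_skip _ _ _ _ (Bool.not_eq_true _ ▸ h)]
      rfl

-- no replacement by a '$'-headed string creates a new occurrence of a pattern '\'x
theorem not_prefix_Rp (old new s : List Char) (x : Char) (hold : old ≠ [])
    (hnewh : new.head? = some '$') (hx : x ≠ '$')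
    (h : ¬ ('\\'::[x]) <+: s) : ¬ ('\\'::[x]) <+: Rp old new s := by
  induction s with
  | nil => rw [Rp_nil _ _ hold]; simp
  | cons c t ih =>
    by_cases hm : old.isPrefixOf (c::t) = true
    · obtain ⟨y, hy⟩ := List.isPrefixOf_iff_prefix.mp hm
      rw [← hy, Rp_match _ _ _ hold]
      cases new with
      | nil => simp at hnewh
      | cons a b =>
        intro hcon
        rcases List.cons_prefix_cons.mp hcon with ⟨ha, _⟩
        simp [← ha] at hnewh
    · rw [Rp_skip _ _ _ _ (Bool.not_eq_true _ ▸ hm)]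
      intro hcon
      rcases (List.cons_prefix_cons.mp hcon) with ⟨rfl, h2⟩
      have hhd : (Rp old new t).head? = some x := by
        cases hr : Rp old new t with
        | nil => rw [hr] at h2; simp at h2
        | cons d e => rw [hr] at h2; rcases List.cons_prefix_cons.mp h2 with ⟨rfl, _⟩; rfl
      rcases head?_Rp old new t hold (by rintro rfl; simp at hnewh) with he | he
      · apply h
        rw [he] at hhd
        cases t with
        | nil => simp at hhd
        | cons d e =>
          simp at hhd
          subst hhd
          exact List.cons_prefix_cons.mpr ⟨rfl, List.cons_prefix_cons.mpr ⟨rfl, List.nil_prefix⟩⟩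
      · rw [he, hnewh] at hhd
        exact hx (Option.some.inj hhd).symm

theorem isPrefixOf_false_of_head (a : Char) (rest Y : List Char) (h : Y.head? ≠ some a) :
    List.isPrefixOf (a::rest) Y = false := by
  cases Y with
  | nil => rfl
  | cons y ys =>
    simp only [List.head?_cons] at h
    simp [List.isPrefixOf]
    intro hy
    exact absurd (by rw [hy]) h

def rA (l : List Char) : List Char := Rp ['\\','[',' '] ['$','$'] l
def rB (l : List Char) : List Char := Rp [' ','\\',']'] ['$','$'] l
def rC (l : List Char) : List Char := Rp ['\\','(',' '] ['$'] l
def rD (l : List Char) : List Char := Rp [' ','\\',')'] ['$'] l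
def rE (l : List Char) : List Char := Rp ['\\','['] ['$','$'] l
def rF (l : List Char) : List Char := Rp ['\\',']'] ['$','$'] l
def rG (l : List Char) : List Char := Rp ['\\','('] ['$'] l
def rH (l : List Char) : List Char := Rp ['\\',')'] ['$'] l

theorem chainL_eq (l : List Char) : chainL l = rH (rG (rF (rE (rD (rC (rB (rA l))))))) := rfl

theorem rA_skip (c x) (h : List.isPrefixOf ['\\','[',' '] (c::x) = false) : rA (c::x) = c :: rA x := Rp_skip _ _ _ _ h
theorem rB_skip (c x) (h : List.isPrefixOf [' ','\\',']'] (c::x) = false) : rB (c::x) = c :: rB x := Rp_skip _ _ _ _ h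
theorem rC_skip (c x) (h : List.isPrefixOf ['\\','(',' '] (c::x) = false) : rC (c::x) = c :: rC x := Rp_skip _ _ _ _ h
theorem rD_skip (c x) (h : List.isPrefixOf [' ','\\',')'] (c::x) = false) : rD (c::x) = c :: rD x := Rp_skip _ _ _ _ h
theorem rE_skip (c x) (h : List.isPrefixOf ['\\','['] (c::x) = false) : rE (c::x) = c :: rE x := Rp_skip _ _ _ _ h
theorem rF_skip (c x) (h : List.isPrefixOf ['\\',']'] (c::x) = false) : rF (c::x) = c :: rF x := Rp_skip _ _ _ _ h
theorem rG_skip (c x) (h : List.isPrefixOf ['\\','('] (c::x) = false) : rG (c::x) = c :: rG x := Rp_skip _ _ _ _ h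
theorem rH_skip (c x) (h : List.isPrefixOf ['\\',')'] (c::x) = false) : rH (c::x) = c :: rH x := Rp_skip _ _ _ _ h

theorem rA_match (t) : rA ('\\'::'['::' '::t) = '$'::'$'::rA t := Rp_match _ _ t (by simp)
theorem rB_match (t) : rB (' '::'\\'::']'::t) = '$'::'$'::rB t := Rp_match _ _ t (by simp)
theorem rC_match (t) : rC ('\\'::'('::' '::t) = '$'::rC t := Rp_match _ _ t (by simp)
theorem rD_match (t) : rD (' '::'\\'::')'::t) = '$'::rD t := Rp_match _ _ t (by simp)
theorem rE_match (t) : rE ('\\'::'['::t) = '$'::'$'::rE t := Rp_match _ _ t (by simp)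
theorem rF_match (t) : rF ('\\'::']'::t) = '$'::'$'::rF t := Rp_match _ _ t (by simp)
theorem rG_match (t) : rG ('\\'::'('::t) = '$'::rG t := Rp_match _ _ t (by simp)
theorem rH_match (t) : rH ('\\'::')'::t) = '$'::rH t := Rp_match _ _ t (by simp)

-- C1
theorem C1 (t) : chainL ('\\'::'['::' '::t) = '$'::'$'::chainL t := by
  rw [chainL_eq, chainL_eq]
  simp [rA_skip, rB_skip, rC_skip, rD_skip, rE_skip, rF_skip, rG_skip, rH_skip,
        rA_match, rB_match, rC_match, rD_match, rE_match, rF_match, rG_match, rH_match, List.isPrefixOf]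

theorem C3 (t) : chainL ('\\'::']'::t) = '$'::'$'::chainL t := by
  rw [chainL_eq, chainL_eq]
  simp [rA_skip, rB_skip, rC_skip, rD_skip, rE_skip, rF_skip, rG_skip, rH_skip,
        rA_match, rB_match, rC_match, rD_match, rE_match, rF_match, rG_match, rH_match, List.isPrefixOf]

theorem C7 (t) : chainL ('\\'::')'::t) = '$'::chainL t := by
  rw [chainL_eq, chainL_eq]
  simp [rA_skip, rB_skip, rC_skip, rD_skip, rE_skip, rF_skip, rG_skip, rH_skip,
        rA_match, rB_match, rC_match, rD_match, rE_match, rF_match, rG_match, rH_match, List.isPrefixOf]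

theorem C8 (t) : chainL (' '::'\\'::']'::t) = '$'::'$'::chainL t := by
  rw [chainL_eq, chainL_eq]
  simp [rA_skip, rB_skip, rC_skip, rD_skip, rE_skip, rF_skip, rG_skip, rH_skip,
        rA_match, rB_match, rC_match, rD_match, rE_match, rF_match, rG_match, rH_match, List.isPrefixOf]

theorem C9 (t) : chainL (' '::'\\'::')'::t) = '$'::chainL t := by
  rw [chainL_eq, chainL_eq]
  simp [rA_skip, rB_skip, rC_skip, rD_skip, rE_skip, rF_skip, rG_skip, rH_skip,
        rA_match, rB_match, rC_match, rD_match, rE_match, rF_match, rG_match, rH_match, List.isPrefixOf]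

theorem C4 (t) : chainL ('\\'::'('::' '::'\\'::']'::t) = '$'::'$'::'$'::chainL t := by
  rw [chainL_eq, chainL_eq]
  simp [rA_skip, rB_skip, rC_skip, rD_skip, rE_skip, rF_skip, rG_skip, rH_skip,
        rA_match, rB_match, rC_match, rD_match, rE_match, rF_match, rG_match, rH_match, List.isPrefixOf]

theorem isPrefixOf_false_of_not_prefix (p Y : List Char) (h : ¬ p <+: Y) :
    List.isPrefixOf p Y = false := by
  rw [← Bool.not_eq_true]
  exact fun hh => h (List.isPrefixOf_iff_prefix.mp hh)

theorem head_or (old new Y : List Char) (d : Char) (hold : old ≠ []) (hnew : new.head? = some '$')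
    (hY : Y.head? = some d ∨ Y.head? = some '$') :
    (Rp old new Y).head? = some d ∨ (Rp old new Y).head? = some '$' := by
  rcases head?_Rp old new Y hold (by rintro rfl; simp at hnew) with h | h
  · rw [h]; exact hY
  · rw [h, hnew]; right; rfl

theorem C0 : chainL [] = [] := by
  rw [chainL_eq]
  simp [rA, rB, rC, rD, rE, rF, rG, rH, Rp_nil]

theorem C2 (t) (h : t.head? ≠ some ' ') : chainL ('\\'::'['::t) = '$'::'$'::chainL t := by
  have hA : List.isPrefixOf [' '] t = false := isPrefixOf_false_of_head ' ' [] t h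
  rw [chainL_eq, chainL_eq]
  simp [rA_skip, rB_skip, rC_skip, rD_skip, rE_skip, rF_skip, rG_skip, rH_skip, hA,
        rA_match, rB_match, rC_match, rD_match, rE_match, rF_match, rG_match, rH_match, List.isPrefixOf]

theorem C5 (t) (h : ¬ ['\\',']'] <+: t) : chainL ('\\'::'('::' '::t) = '$'::chainL t := by
  have hB : List.isPrefixOf ['\\',']'] (rA t) = false :=
    isPrefixOf_false_of_not_prefix _ _ (not_prefix_Rp _ _ t ']' (by simp) rfl (by decide) h)
  rw [chainL_eq, chainL_eq]
  simp [rA_skip, rB_skip, rC_skip, rD_skip, rE_skip, rF_skip, rG_skip, rH_skip, hB,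
        rA_match, rB_match, rC_match, rD_match, rE_match, rF_match, rG_match, rH_match, List.isPrefixOf]

theorem C6 (t) (h : t.head? ≠ some ' ') : chainL ('\\'::'('::t) = '$'::chainL t := by
  have k1 : (rA t).head? = t.head? ∨ (rA t).head? = some '$' := by
    rcases head?_Rp ['\\','[',' '] ['$','$'] t (by simp) (by simp) with hh | hh
    · left; exact hh
    · right; exact hh
  have k2 : (rB (rA t)).head? = t.head? ∨ (rB (rA t)).head? = some '$' := by
    rcases head?_Rp [' ','\\',']'] ['$','$'] (rA t) (by simp) (by simp) with hh | hh
    · exact hh ▸ k1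
    · right; exact hh
  have hX : (rB (rA t)).head? ≠ some ' ' := by
    rcases k2 with hh | hh <;> rw [hh]
    · exact h
    · simp
  have hC : List.isPrefixOf [' '] (rB (rA t)) = false := isPrefixOf_false_of_head ' ' [] _ hX
  rw [chainL_eq, chainL_eq]
  simp [rA_skip, rB_skip, rC_skip, rD_skip, rE_skip, rF_skip, rG_skip, rH_skip, hC,
        rA_match, rB_match, rC_match, rD_match, rE_match, rF_match, rG_match, rH_match, List.isPrefixOf]

theorem C12 (u) (hj : ¬ ['\\',']'] <+: u) (hp : ¬ ['\\',')'] <+: u) :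
    chainL (' '::u) = ' '::chainL u := by
  have hB : List.isPrefixOf ['\\',']'] (rA u) = false :=
    isPrefixOf_false_of_not_prefix _ _ (not_prefix_Rp _ _ u ']' (by simp) rfl (by decide) hj)
  have hD : List.isPrefixOf ['\\',')'] (rC (rB (rA u))) = false := by
    apply isPrefixOf_false_of_not_prefix
    apply not_prefix_Rp _ _ _ ')' (by simp) rfl (by decide)
    apply not_prefix_Rp _ _ _ ')' (by simp) rfl (by decide)
    apply not_prefix_Rp _ _ _ ')' (by simp) rfl (by decide)
    exact hp
  rw [chainL_eq, chainL_eq]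
  simp [rA_skip, rB_skip, rC_skip, rD_skip, rE_skip, rF_skip, rG_skip, rH_skip, hB, hD,
        rA_match, rB_match, rC_match, rD_match, rE_match, rF_match, rG_match, rH_match, List.isPrefixOf]

theorem C13 (c t) (h1 : c ≠ '\\') (h2 : c ≠ ' ') : chainL (c::t) = c::chainL t := by
  have e1 : ('\\' == c) = false := by simp [(Ne.symm h1)]
  have e2 : (' ' == c) = false := by simp [(Ne.symm h2)]
  rw [chainL_eq, chainL_eq]
  simp [rA_skip, rB_skip, rC_skip, rD_skip, rE_skip, rF_skip, rG_skip, rH_skip, e1, e2,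
        List.isPrefixOf]

theorem C10 (d u) (h1 : d ≠ '[') (h2 : d ≠ ']') (h3 : d ≠ '(') (h4 : d ≠ ')') :
    chainL ('\\'::d::u) = '\\'::chainL (d::u) := by
  have e1 : ('[' == d) = false := by simp [(Ne.symm h1)]
  have k0 : (d::u).head? = some d ∨ (d::u).head? = some '$' := Or.inl rfl
  have k1 : (rA (d::u)).head? = some d ∨ (rA (d::u)).head? = some '$' :=
    head_or ['\\','[',' '] ['$','$'] (d::u) d (by simp) rfl k0
  have k2 : (rB (rA (d::u))).head? = some d ∨ (rB (rA (d::u))).head? = some '$' :=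
    head_or [' ','\\',']'] ['$','$'] _ d (by simp) rfl k1
  have k3 : (rC (rB (rA (d::u)))).head? = some d ∨ (rC (rB (rA (d::u)))).head? = some '$' :=
    head_or ['\\','(',' '] ['$'] _ d (by simp) rfl k2
  have k4 : (rD (rC (rB (rA (d::u))))).head? = some d ∨ (rD (rC (rB (rA (d::u))))).head? = some '$' :=
    head_or [' ','\\',')'] ['$'] _ d (by simp) rfl k3
  have k5 : (rE (rD (rC (rB (rA (d::u)))))).head? = some d ∨ (rE (rD (rC (rB (rA (d::u)))))).head? = some '$' :=
    head_or ['\\','['] ['$','$'] _ d (by simp) rfl k4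
  have k6 : (rF (rE (rD (rC (rB (rA (d::u))))))).head? = some d ∨ (rF (rE (rD (rC (rB (rA (d::u))))))).head? = some '$' :=
    head_or ['\\',']'] ['$','$'] _ d (by simp) rfl k5
  have k7 : (rG (rF (rE (rD (rC (rB (rA (d::u)))))))).head? = some d ∨ (rG (rF (rE (rD (rC (rB (rA (d::u)))))))).head? = some '$' :=
    head_or ['\\','('] ['$'] _ d (by simp) rfl k6
  have ne_of : ∀ (Y : List Char) (a : Char), a ≠ d → a ≠ '$' →
      (Y.head? = some d ∨ Y.head? = some '$') → Y.head? ≠ some a := by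
    intro Y a ha hd hY
    rcases hY with hh | hh <;> rw [hh] <;> simp [Ne.symm ha, Ne.symm hd]
  have hC : List.isPrefixOf ['(',' '] (rB (rA (d::u))) = false :=
    isPrefixOf_false_of_head _ _ _ (ne_of _ _ (fun hh => h3 hh.symm) (by decide) k2)
  have hE : List.isPrefixOf ['['] (rD (rC (rB (rA (d::u))))) = false :=
    isPrefixOf_false_of_head _ _ _ (ne_of _ _ (fun hh => h1 hh.symm) (by decide) k4)
  have hF : List.isPrefixOf [']'] (rE (rD (rC (rB (rA (d::u)))))) = false :=
    isPrefixOf_false_of_head _ _ _ (ne_of _ _ (fun hh => h2 hh.symm) (by decide) k5)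
  have hG : List.isPrefixOf ['('] (rF (rE (rD (rC (rB (rA (d::u))))))) = false :=
    isPrefixOf_false_of_head _ _ _ (ne_of _ _ (fun hh => h3 hh.symm) (by decide) k6)
  have hH : List.isPrefixOf [')'] (rG (rF (rE (rD (rC (rB (rA (d::u)))))))) = false :=
    isPrefixOf_false_of_head _ _ _ (ne_of _ _ (fun hh => h4 hh.symm) (by decide) k7)
  rw [chainL_eq, chainL_eq]
  simp [rA_skip, rB_skip, rC_skip, rD_skip, rE_skip, rF_skip, rG_skip, rH_skip,
        e1, hC, hE, hF, hG, hH, List.isPrefixOf]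

-- unfold lemmas for pvConv and pvSkipSpace
theorem pvSkipSpace_sp (t) : pvSkipSpace (' '::t) = t := rfl

theorem pvSkipSpace_ne (t : List Char) (h : t.head? ≠ some ' ') : pvSkipSpace t = t := by
  rw [pvSkipSpace.eq_def]; split <;> simp_all

theorem U1 : pvConv [] = [] := by
  rw [pvConv.eq_def]

theorem U2 (t) : pvConv ('\\'::'['::t) = '$'::'$'::pvConv (pvSkipSpace t) := by
  rw [pvConv.eq_def]; rfl

theorem U3 (t) : pvConv ('\\'::']'::t) = '$'::'$'::pvConv t := by
  rw [pvConv.eq_def]; rfl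

theorem U4 (t) : pvConv ('\\'::'('::t) = '$'::pvConv (pvSkipSpace t) := by
  rw [pvConv.eq_def]; rfl

theorem U5 (t) : pvConv ('\\'::')'::t) = '$'::pvConv t := by
  rw [pvConv.eq_def]; rfl

theorem U6 (t) : pvConv (' '::'\\'::']'::t) = '$'::'$'::pvConv t := by
  rw [pvConv.eq_def]; rfl

theorem U7 (t) : pvConv (' '::'\\'::')'::t) = '$'::pvConv t := by
  rw [pvConv.eq_def]; rfl

theorem U8 (c t) (h1 : c ≠ '\\') (h2 : c ≠ ' ') : pvConv (c::t) = c :: pvConv t := by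
  rw [pvConv.eq_def]; split <;> simp_all <;> tauto

theorem U9 (d u) (h1 : d ≠ '[') (h2 : d ≠ ']') (h3 : d ≠ '(') (h4 : d ≠ ')') :
    pvConv ('\\'::d::u) = '\\' :: pvConv (d::u) := by
  rw [pvConv.eq_def]; split <;> simp_all <;> tauto

theorem U10 : pvConv ['\\'] = ['\\'] := by
  simp [pvConv.eq_def]

theorem U11 (u) (hj : u.head? = some '\\' → u.tail.head? ≠ some ']' ∧ u.tail.head? ≠ some ')') :
    pvConv (' '::u) = ' ' :: pvConv u := by
  rw [pvConv.eq_def]; split <;> simp_all <;> tauto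

-- master: the eight chained replaces equal B's single scan
theorem chain_eq_conv : ∀ (n : Nat) (l : List Char), l.length ≤ n → chainL l = pvConv l := by
  intro n
  induction n with
  | zero =>
    intro l hl
    have : l = [] := by cases l with | nil => rfl | cons c t => simp at hl
    subst this; rw [C0, U1]
  | succ n ih =>
    intro l hl
    cases l with
    | nil => rw [C0, U1]
    | cons c t =>
      have hlt : t.length ≤ n := by simpa using hl
      by_cases hc : c = '\\'
      · subst hc
        cases t with
        | nil =>
          rw [U10, show chainL ['\\'] = ['\\'] from by decide]
        | cons d u =>
          have hlu : u.length ≤ n := by simp at hl; omega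
          by_cases hd1 : d = '['
          · subst hd1
            cases u with
            | nil =>
              rw [C2 [] (by simp), U2, C0]
              simp [pvSkipSpace, U1]
            | cons e v =>
              have hlv : v.length ≤ n := by simp at hl; omega
              by_cases he : e = ' '
              · subst he
                rw [C1, U2, pvSkipSpace_sp, ih v hlv]
              · rw [C2 (e::v) (by simp [he]), U2, pvSkipSpace_ne _ (by simp [he]),
                    ih (e::v) hlu]
          · by_cases hd2 : d = ']'
            · subst hd2
              rw [C3, U3, ih u hlu]
            · by_cases hd3 : d = '('
              · subst hd3
                cases u with
                | nil =>
                  rw [C6 [] (by simp), U4, C0]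
                  simp [pvSkipSpace, U1]
                | cons e v =>
                  have hlv : v.length ≤ n := by simp at hl; omega
                  by_cases he : e = ' '
                  · subst he
                    by_cases hbr : ['\\',']'] <+: v
                    · obtain ⟨w, hw⟩ := hbr
                      have hww : w.length ≤ n := by
                        subst hw; simp at hl; omega
                      subst hw
                      rw [show ('\\'::'('::' '::(['\\',']'] ++ w)) =
                            ('\\'::'('::' '::'\\'::']'::w) from rfl] at *
                      rw [C4, U4, pvSkipSpace_sp, U3, ih w hww]
                    · rw [C5 v hbr, U4, pvSkipSpace_sp, ih v hlv]
                  · rw [C6 (e::v) (by simp [he]), U4, pvSkipSpace_ne _ (by simp [he]),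
                        ih (e::v) hlu]
              · by_cases hd4 : d = ')'
                · subst hd4
                  rw [C7, U5, ih u hlu]
                · rw [C10 d u hd1 hd2 hd3 hd4, U9 d u hd1 hd2 hd3 hd4, ih (d::u) hlt]
      · by_cases hsp : c = ' '
        · subst hsp
          by_cases hj : ['\\',']'] <+: t
          · obtain ⟨w, hw⟩ := hj
            have hww : w.length ≤ n := by subst hw; simp at hl; omega
            subst hw
            rw [show (' '::(['\\',']'] ++ w)) = (' '::'\\'::']'::w) from rfl] at *
            rw [C8, U6, ih w hww]
          · by_cases hp : ['\\',')'] <+: t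
            · obtain ⟨w, hw⟩ := hp
              have hww : w.length ≤ n := by subst hw; simp at hl; omega
              subst hw
              rw [show (' '::(['\\',')'] ++ w)) = (' '::'\\'::')'::w) from rfl] at *
              rw [C9, U7, ih w hww]
            · rw [C12 t hj hp, ih t hlt]
              rw [U11 t ?_]
              intro hbs
              constructor
              · intro hcl
                apply hj
                cases t with
                | nil => simp at hbs
                | cons a b =>
                  simp at hbs; subst hbs
                  cases b with
                  | nil => simp at hcl
                  | cons a2 b2 =>
                    simp at hcl; subst hcl
                    exact ⟨b2, rfl⟩
              · intro hcl
                apply hp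
                cases t with
                | nil => simp at hbs
                | cons a b =>
                  simp at hbs; subst hbs
                  cases b with
                  | nil => simp at hcl
                  | cons a2 b2 =>
                    simp at hcl; subst hcl
                    exact ⟨b2, rfl⟩
        · rw [C13 c t hc hsp, U8 c t hc hsp, ih t hlt]

-- bridge to strings
theorem replaceAll_eq (s : String) :
    pvReplaceAllA s = String.ofList (pvConv s.toList) := by
  have h : (pvReplaceAllA s).toList = chainL s.toList := by
    simp [pvReplaceAllA, chainL, Rp, PySem.Str.toList_replace]
  rw [chain_eq_conv s.toList.length s.toList (le_refl _)] at h
  rw [← h]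
  exact (String.ofList_toList).symm

-- ===== VERDICT (by name: the statement is the Claim_ definition above) =====
theorem bbcode_to_markdown_math_spec : Claim_equal_bbcode_to_markdown_math := by
  intro messages _hdom _hpre
  unfold Spec_bbcode_to_markdown_math bbcode_to_markdown_math bbcode_to_markdown_math_alt
  apply List.map_congr_left
  intro msg _
  cases h : (PySem.Dict.mk msg).get? "role" with
  | none => simp only [h]
  | some r =>
    simp only [h]
    by_cases hr : r = "assistant"
    · subst hr
      rw [if_pos rfl, if_pos rfl]
      cases h2 : (PySem.Dict.mk msg).get? "content" with
      | none => rfl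
      | some c => simp only [replaceAll_eq]
    · rw [if_neg hr, if_neg hr]
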